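-- pv_equiv track=rewrite | github.com/chaon1ce/U- | u.py | anys
-- ===== SOURCE A (Python) =====
-- def anys(str1):
--     j = 0
--     k = 0
--     for i in str1:
--         k = k + 1
--         if (i == '/'):
--             j = k
--     return str1[j:]
-- ===== SOURCE B (Python) =====
-- def anys(str1):
--     return str1.split('/')[-1]
-- ===== Notes on version B (the rewrite author's own statement) =====
-- stated objective: idiomatic
-- what changed: Replaces the manual character loop with slash-position counters and a tail slice by splitting the string on the separator and taking the last segment.
import Mathlib
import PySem

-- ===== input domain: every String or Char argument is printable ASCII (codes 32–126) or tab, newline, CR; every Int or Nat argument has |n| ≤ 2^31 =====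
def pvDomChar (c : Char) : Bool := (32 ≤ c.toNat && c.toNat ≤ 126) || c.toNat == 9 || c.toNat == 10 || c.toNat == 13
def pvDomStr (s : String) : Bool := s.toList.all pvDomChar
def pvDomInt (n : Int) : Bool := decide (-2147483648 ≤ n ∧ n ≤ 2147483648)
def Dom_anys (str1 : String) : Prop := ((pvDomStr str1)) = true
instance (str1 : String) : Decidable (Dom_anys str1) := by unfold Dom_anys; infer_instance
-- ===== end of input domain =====

-- B: instead of A's manual counter loop locating the last '/', split the string on '/' and return the last segment (idiomatic; same O(n) cost).


-- ===== PORT A =====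
-- 'for i in str1: k = k+1; if i == '/': j = k' as a foldl over the characters; 'str1[j:]' via the PySem slice
def anys (str1 : String) : String :=
  let jk := str1.toList.foldl (fun (jk : Int × Int) i =>
    let k := jk.2 + 1
    (if i = '/' then k else jk.1, k)) (0, 0)
  PySem.Str.slice str1 (some jk.1) none

-- ===== PORT B =====
-- 'return str1.split('/')[-1]' ; split? is some here (sep ≠ ""), and the parts list is never empty, so [-1] never raises
def anys_alt (str1 : String) : String :=
  match PySem.Str.split? str1 "/" with
  | some parts => (PySem.List.pyGet? parts (-1)).getD ""
  | none => ""

-- ===== PRECONDITION & SPEC =====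
def Spec_anys (str1 : String) (out : String) : Prop := out = anys_alt str1
instance (str1 : String) (out : String) : Decidable (Spec_anys str1 out) := by unfold Spec_anys; infer_instance

-- ===== CLAIM (what is proved, stated in full; the proofs are below) =====
def Claim_equal_anys : Prop := ∀ (str1 : String), Dom_anys str1 → Spec_anys str1 (anys str1)

-- ===== LEMMAS AND PROOFS =====

-- the common target: what comes after the last slash (forward recursion)
def tailT : List Char → List Char
  | [] => []
  | c :: t => if '/' ∈ t then tailT t else (if c = '/' then t else c :: t)

-- structural mirror of splitOn.go for sep = ['/'], with the current piece carried in order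
def pvParts (pre : List Char) : List Char → List (List Char)
  | [] => [pre]
  | c :: t => if c = '/' then pre :: pvParts [] t else pvParts (pre ++ [c]) t

lemma go_spec : ∀ (l : List Char) (fuel : Nat) (cur : List Char) (acc : List (List Char)),
    l.length ≤ fuel →
    PySem.Chars.splitOn.go ['/'] fuel l cur acc = acc.reverse ++ pvParts cur.reverse l := by
  intro l
  induction l with
  | nil =>
    intro fuel cur acc _
    cases fuel <;> simp [PySem.Chars.splitOn.go, pvParts]
  | cons c t ih =>
    intro fuel cur acc hle
    cases fuel with
    | zero => simp at hle
    | succ f =>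
      by_cases hc : c = '/'
      · subst hc
        have hp : List.isPrefixOf ['/'] ('/' :: t) = true := by simp [List.isPrefixOf]
        simp only [PySem.Chars.splitOn.go, hp, if_pos]
        have hd : List.drop (['/'] : List Char).length ('/' :: t) = t := by simp
        rw [hd, ih f [] (cur.reverse :: acc) (by simpa using hle)]
        simp [pvParts]
      · have hp : List.isPrefixOf ['/'] (c :: t) = false := by
          simp [List.isPrefixOf]
          exact fun h => (hc h.symm).elim
        simp only [PySem.Chars.splitOn.go, hp, Bool.false_eq_true, if_false]
        rw [ih f (c :: cur) acc (by simpa using hle)]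
        simp [pvParts, hc]

lemma getLast?_cons_of_some {α : Type} (a x : α) (l : List α) (h : l.getLast? = some x) :
    (a :: l).getLast? = some x := by
  cases l with
  | nil => simp at h
  | cons b u => rw [List.getLast?_cons_cons]; exact h

lemma pvParts_getLast? : ∀ (l : List Char) (pre : List Char),
    (pvParts pre l).getLast? = some (if '/' ∈ l then tailT l else pre ++ l) := by
  intro l
  induction l with
  | nil => intro pre; simp [pvParts, tailT]
  | cons c t ih =>
    intro pre
    by_cases hc : c = '/'
    · subst hc
      rw [pvParts, if_pos rfl, getLast?_cons_of_some _ _ _ (ih [])]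
      simp only [tailT, List.mem_cons, true_or, if_pos]
      by_cases hm : '/' ∈ t <;> simp [hm]
    · rw [pvParts, if_neg hc, ih]
      simp only [tailT]
      by_cases hm : '/' ∈ t <;> simp [hm, hc, Ne.symm hc]

lemma tailT_append : ∀ (l : List Char) (c : Char),
    tailT (l ++ [c]) = if c = '/' then [] else tailT l ++ [c] := by
  intro l
  induction l with
  | nil => intro c; by_cases hc : c = '/' <;> simp [tailT, hc]
  | cons d u ih =>
    intro c
    by_cases hc : c = '/'
    · subst hc
      simp only [List.cons_append, tailT, List.mem_append, List.mem_singleton, true_or, or_true,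
        if_pos, ih, if_pos rfl]
    · have hmem : '/' ∈ u ++ [c] ↔ '/' ∈ u := by simp [Ne.symm hc]
      by_cases hm : '/' ∈ u
      · simp only [List.cons_append, tailT, hmem.mpr hm, hm, if_pos, ih, if_neg hc]
      · have : ¬ '/' ∈ u ++ [c] := fun h => hm (hmem.mp h)
        by_cases hd : d = '/' <;>
          simp [tailT, this, hm, hd, hc]

lemma foldA_spec (l : List Char) :
    (l.foldl (fun (jk : Int × Int) i => ((if i = '/' then jk.2 + 1 else jk.1), jk.2 + 1)) (0, 0)).2 = l.length ∧
    ∃ jn : Nat, (l.foldl (fun (jk : Int × Int) i => ((if i = '/' then jk.2 + 1 else jk.1), jk.2 + 1)) (0, 0)).1 = (jn : Int)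
      ∧ jn ≤ l.length ∧ l.drop jn = tailT l := by
  induction l using List.reverseRecOn with
  | nil => exact ⟨rfl, 0, by simp [tailT]⟩
  | append_singleton l c ih =>
    obtain ⟨hk, jn, hj, hle, hdrop⟩ := ih
    rw [List.foldl_append]
    by_cases hc : c = '/'
    · refine ⟨by simp [hk], l.length + 1, ?_, by simp, ?_⟩
      · simp [hc, hk]
      · rw [tailT_append, if_pos hc, List.drop_eq_nil_iff.mpr (by simp)]
    · refine ⟨by simp [hk], jn, by simp [hc, hj], by simp; omega, ?_⟩
      rw [tailT_append, if_neg hc, List.drop_append_of_le_length hle, hdrop]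

lemma pyGet?_neg_one {α : Type} (l : List α) (h : l ≠ []) :
    PySem.List.pyGet? l (-1) = l.getLast? := by
  have hl : 0 < l.length := List.length_pos_iff.mpr h
  rw [PySem.List.pyGet?, PySem.List.pyIdx?, if_neg (by omega), if_pos (by omega)]
  rw [List.getLast?_eq_getElem?]
  simp

lemma tailT_of_not_mem : ∀ (l : List Char), '/' ∉ l → tailT l = l := by
  intro l
  induction l with
  | nil => intro _; rfl
  | cons c t ih =>
    intro h
    have hc : ¬ c = '/' := fun hc => h (by simp [hc])
    have ht : '/' ∉ t := fun ht => h (by simp [ht])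
    simp [tailT, ht, hc]

lemma anys_eq_tailT (s : String) : anys s = String.ofList (tailT s.toList) := by
  obtain ⟨hk, jn, hj, hle, hdrop⟩ := foldA_spec s.toList
  simp only [anys]
  rw [hj, PySem.Str.slice]
  congr 1
  rw [PySem.Chars.slice_eq_listSlice, PySem.List.slice_from_natCast]
  exact hdrop

lemma anys_alt_eq_tailT (s : String) : anys_alt s = String.ofList (tailT s.toList) := by
  have hsep : ("/" : String).toList = ['/'] := rfl
  have hsplit : PySem.Chars.splitOn s.toList ['/'] = pvParts [] s.toList := by
    rw [PySem.Chars.splitOn, go_spec s.toList (s.toList.length + 1) [] [] (by omega)]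
    simp
  have hlast : (pvParts [] s.toList).getLast? = some (tailT s.toList) := by
    rw [pvParts_getLast?]
    by_cases hm : '/' ∈ s.toList
    · simp [hm]
    · simp [hm, tailT_of_not_mem s.toList hm]
  have hne : pvParts [] s.toList ≠ [] := by
    intro h; rw [h] at hlast; simp at hlast
  simp only [anys_alt, PySem.Str.split?, hsep, PySem.Chars.split?]
  rw [if_neg (by simp)]
  simp only [Option.map_some, hsplit]
  rw [pyGet?_neg_one _ (by simpa using hne), List.getLast?_map, hlast]
  rfl

-- ===== VERDICT (by name: the statement is the Claim_ definition above) =====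
theorem anys_spec : Claim_equal_anys := by
  intro s _
  unfold Spec_anys
  rw [anys_eq_tailT, anys_alt_eq_tailT]
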